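-- pv_equiv track=rewrite | github.com/MAXEUR5/evidetective-artifacts | mini_elf_feature_extract/sampler.py | norm_api
-- ===== SOURCE A (Python) =====
-- def norm_api(name: str) -> str:
--     """
--     Normalize API names (align with func_call_dict / call_subgraph.used_imports):
--     - Collapse multiple leading '_' that may appear in IDA/objdump (e.g., ___stack_chk_fail -> __stack_chk_fail).
--     - Preserve C++ Itanium ABI mangled names (_Z...).
--     - Preserve double-underscore runtime symbols (__xxx).
--     - Remove a single leading '_' in other cases (common in IDA/objdump output).
--     """
--     if not name:
--         return ""
--     if name.startswith("___") and not name.startswith("_Z"):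
--         while name.startswith("___"):
--             name = name[1:]
--
--     if name.startswith("_Z"):
--         return name
--     if name.startswith("__"):
--         return name
--     if name.startswith("_") and not name.startswith("_Z"):
--         return name[1:]
--     return name
-- ===== SOURCE B (Python) =====
-- def norm_api(name: str) -> str:
--     if name.startswith("_Z"):
--         return name
--     k = len(name) - len(name.lstrip("_"))
--     if k <= 1:
--         return name[k:]
--     return "__" + name[k:]
-- ===== Notes on version B (the rewrite author's own statement) =====
-- stated objective: simpler
-- what changed: B computes the leading-underscore count k once via lstrip instead of A's while-loop that strips one character at a time, and collapses A's four-way prefix branching into a single slice: name[k:] when k is at most 1, otherwise two underscores followed by name[k:].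
import Mathlib
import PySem

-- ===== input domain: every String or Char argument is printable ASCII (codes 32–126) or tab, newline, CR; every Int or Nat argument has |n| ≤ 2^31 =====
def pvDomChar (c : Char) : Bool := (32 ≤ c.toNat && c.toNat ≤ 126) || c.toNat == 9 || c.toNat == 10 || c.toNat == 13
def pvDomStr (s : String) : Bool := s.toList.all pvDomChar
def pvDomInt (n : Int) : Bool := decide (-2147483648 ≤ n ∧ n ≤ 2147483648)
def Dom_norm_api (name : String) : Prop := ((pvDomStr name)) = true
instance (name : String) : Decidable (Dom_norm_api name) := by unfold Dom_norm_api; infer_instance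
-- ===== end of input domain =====

-- B computes the leading-underscore count once and slices, instead of A's char-by-char stripping loop and prefix-branch chain (objective: simpler).

-- ===== PORT A =====
-- the 'while name.startswith("___"): name = name[1:]' loop of A
def stripA (s : List Char) : List Char :=
  if h : PySem.Chars.startswith s ['_', '_', '_'] = true then
    stripA (PySem.Chars.slice s (some 1) none)
  else s
termination_by s.length
decreasing_by
  rcases (PySem.Chars.startswith_iff s ['_', '_', '_']).mp h with ⟨t, ht⟩
  simp [PySem.Chars.slice, PySem.List.slice_from_one, ← ht]

def normA (s : List Char) : List Char :=
  if s = [] then []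
  else
    let s1 := if PySem.Chars.startswith s ['_', '_', '_'] && !(PySem.Chars.startswith s ['_', 'Z'])
              then stripA s else s
    if PySem.Chars.startswith s1 ['_', 'Z'] then s1
    else if PySem.Chars.startswith s1 ['_', '_'] then s1
    else if PySem.Chars.startswith s1 ['_'] && !(PySem.Chars.startswith s1 ['_', 'Z']) then
      PySem.Chars.slice s1 (some 1) none
    else s1

def norm_api (name : String) : String := String.ofList (normA name.toList)

-- ===== PORT B =====
def normB (s : List Char) : List Char :=
  if PySem.Chars.startswith s ['_', 'Z'] then s
  else
    -- name.lstrip("_") is ported by hand as dropWhile (· == '_'): exact, since the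
    -- strip set is the single character '_'
    let k : Nat := s.length - (s.dropWhile (· == '_')).length
    if k ≤ 1 then PySem.Chars.slice s (some (k : Int)) none
    else '_' :: '_' :: PySem.Chars.slice s (some (k : Int)) none

def norm_api_alt (name : String) : String := String.ofList (normB name.toList)

-- ===== PRECONDITION & SPEC =====
def Spec_norm_api (name : String) (out : String) : Prop := out = norm_api_alt name
instance (name : String) (out : String) : Decidable (Spec_norm_api name out) := by unfold Spec_norm_api; infer_instance

-- ===== CLAIM (what is proved, stated in full; the proofs are below) =====
def Claim_equal_norm_api : Prop := ∀ (name : String), Dom_norm_api name → Spec_norm_api name (norm_api name)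

-- ===== LEMMAS AND PROOFS =====

-- every list of chars splits as (leading underscores) ++ (rest not starting with '_')
theorem decomp_underscores (s : List Char) :
    ∃ k r, s = List.replicate k '_' ++ r ∧ r.head? ≠ some '_' := by
  refine ⟨(s.takeWhile (· == '_')).length, s.dropWhile (· == '_'), ?_, ?_⟩
  · conv_lhs => rw [← List.takeWhile_append_dropWhile (p := (· == '_')) (l := s)]
    congr 1
    apply List.eq_replicate_of_mem
    intro c hc
    have := List.mem_takeWhile_imp hc
    simpa using this
  · cases hd : s.dropWhile (· == '_') with
    | nil => simp
    | cons c t =>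
      have := List.head_dropWhile_not (p := (· == '_')) (l := s) (by simp [hd])
      simp_all

theorem slice_nat (s : List Char) (k : Nat) :
    PySem.Chars.slice s (some (k : Int)) none = s.drop k := by
  simp [PySem.Chars.slice, PySem.List.slice_from_natCast]

theorem dropWhile_repl (k : Nat) (r : List Char) (hr : r.head? ≠ some '_') :
    (List.replicate k '_' ++ r).dropWhile (· == '_') = r := by
  induction k with
  | zero =>
    cases r with
    | nil => simp
    | cons c t =>
      have hb : (c == '_') = false := by
        simp only [List.head?_cons, ne_eq, Option.some.injEq] at hr
        simpa using hr
      simp [List.dropWhile, hb]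
  | succ m ih => simpa [List.replicate, List.dropWhile] using ih

theorem stripA_two (m : Nat) (r : List Char) (hr : r.head? ≠ some '_') :
    stripA ('_' :: '_' :: (List.replicate m '_' ++ r)) = '_' :: '_' :: r := by
  induction m with
  | zero =>
    rw [stripA]
    cases r with
    | nil => simp [PySem.Chars.startswith, List.isPrefixOf]
    | cons c t =>
      have hc' : ¬ ('_' = c) := by
        simp only [List.head?_cons, ne_eq, Option.some.injEq] at hr
        exact fun h => hr h.symm
      simp [PySem.Chars.startswith, List.isPrefixOf, hc']
  | succ n ih =>
    rw [stripA]
    have hsw : PySem.Chars.startswith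
        ('_' :: '_' :: (List.replicate (n + 1) '_' ++ r)) ['_', '_', '_'] = true := by
      simp [List.replicate_succ, PySem.Chars.startswith, List.isPrefixOf]
    rw [dif_pos hsw]
    have htail : PySem.Chars.slice ('_' :: '_' :: (List.replicate (n + 1) '_' ++ r)) (some 1) none
        = '_' :: '_' :: (List.replicate n '_' ++ r) := by
      simp [PySem.Chars.slice, PySem.List.slice_from_one, List.replicate_succ]
    rw [htail]
    exact ih

theorem normA_eq_normB (s : List Char) : normA s = normB s := by
  obtain ⟨k, r, hs, hr⟩ := decomp_underscores s
  subst hs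
  match k, r, hr with
  | 0, [], _ => decide
  | 0, c :: t, hr =>
    have hc' : ¬ ('_' = c) := by
      simp only [List.head?_cons, ne_eq, Option.some.injEq] at hr
      exact fun h => hr h.symm
    have hb : (c == '_') = false := by simpa using fun h => hc' h.symm
    simp [normA, normB, PySem.Chars.startswith, List.isPrefixOf, hc', hb]
  | 1, [], _ => decide
  | 1, c :: t, hr =>
    have hc' : ¬ ('_' = c) := by
      simp only [List.head?_cons, ne_eq, Option.some.injEq] at hr
      exact fun h => hr h.symm
    have hb : (c == '_') = false := by simpa using fun h => hc' h.symm
    by_cases hcz : c = 'Z'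
    · subst hcz
      simp [normA, normB, PySem.Chars.startswith, List.isPrefixOf]
    · have hz' : ¬ ('Z' = c) := fun h => hcz h.symm
      simp [normA, normB, PySem.Chars.startswith, List.isPrefixOf, hc', hz', hb, slice_nat]
  | 2, r, hr =>
    have hdw : (List.dropWhile (fun x => x == '_') ('_' :: '_' :: r)) = r := by
      simpa [List.replicate] using dropWhile_repl 2 r hr
    have hsw3 : PySem.Chars.startswith ('_' :: '_' :: r) ['_', '_', '_'] = false := by
      cases r with
      | nil => decide
      | cons c t =>
        have hc' : ¬ ('_' = c) := by
          simp only [List.head?_cons, ne_eq, Option.some.injEq] at hr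
          exact fun h => hr h.symm
        simp [PySem.Chars.startswith, List.isPrefixOf, hc']
    have hpr : ¬ (['_'] <+: r) := by rintro ⟨t, rfl⟩; simp at hr
    have h2 : r.length + 1 + 1 - r.length = 2 := by omega
    have hlt : ¬ (r.length + 1 < 1 + r.length) := by omega
    simp only [List.replicate, List.cons_append, List.nil_append]
    simp [normA, normB, hsw3, hdw, hpr, h2, hlt,
      PySem.Chars.startswith, List.isPrefixOf]
    rw [show (2 : Int) = ((2 : Nat) : Int) from by norm_num, PySem.List.slice_from_natCast]
    simp
  | (m + 3), r, hr =>
    have hrepl : List.replicate (m + 3) '_' ++ r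
        = '_' :: '_' :: '_' :: (List.replicate m '_' ++ r) := by
      simp [List.replicate_succ]
    rw [hrepl]
    have hdw : (List.dropWhile (fun x => x == '_')
        ('_' :: '_' :: '_' :: (List.replicate m '_' ++ r))) = r := by
      simpa [List.replicate_succ] using dropWhile_repl (m + 3) r hr
    have hstrip : stripA ('_' :: '_' :: '_' :: (List.replicate m '_' ++ r))
        = '_' :: '_' :: r := by
      simpa [List.replicate_succ] using stripA_two (m + 1) r hr
    have hdrop : List.drop (m + 3) ('_' :: '_' :: '_' :: (List.replicate m '_' ++ r)) = r := by
      have h : List.drop (m + 3) ('_' :: '_' :: '_' :: (List.replicate m '_' ++ r))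
          = (List.replicate m '_' ++ r).drop m := by simp [List.drop]
      rw [h]
      simpa using List.drop_left (List.replicate m '_') r
    have hpr : ¬ (['_'] <+: r) := by rintro ⟨t, rfl⟩; simp at hr
    have h3 : m + r.length + 1 + 1 + 1 - r.length = m + 3 := by omega
    have hlt : ¬ (m + r.length + 1 + 1 < 1 + r.length) := by omega
    simp [normA, normB, hdw, hstrip, hpr, h3, hlt,
      PySem.Chars.startswith, List.isPrefixOf]
    rw [show ((m : Int) + 3) = (((m + 3 : Nat)) : Int) from by push_cast; ring,
      PySem.List.slice_from_natCast, hdrop]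

-- ===== VERDICT (by name: the statement is the Claim_ definition above) =====
theorem norm_api_spec : Claim_equal_norm_api := by
  intro name _
  unfold Spec_norm_api norm_api norm_api_alt
  rw [normA_eq_normB]
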